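-- pv_equiv track=rewrite | github.com/vmkmym/Algorithm | 백준/Gold/1339. 단어 수학/단어 수학.py | math_word
-- ===== SOURCE A (Python) =====
-- from collections import Counter
--
-- def math_word(words):
--     counter = Counter()
--
--     # 각 단어의 알파벳별 가중치를 계산
--     # (가중치는 10의 자리수로 계산한다. ex) AB = 10A + B, BA = 10B + A
--     for word in words:
--         length = len(word)
--         for i in range(length):
--             counter[word[i]] += 10 ** (length - i - 1)
--
--     # 가중치를 기준으로 내림차순 정렬. ex) [10+1 = 11, 1+10 =11]
--     values = sorted(counter.values(), reverse=True)
--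
--     # 가중치가 높은 순으로 9부터 곱해서 더한다.
--     result = 0
--     for i in range(len(values)):
--         result += values[i] * (9 - i) # 11*9, 11*8
--     return result # 119 + 118 = 187
-- ===== SOURCE B (Python) =====
-- from collections import Counter
--
-- def math_word(words):
--     # same positional-weight counter as before
--     counter = Counter()
--     for word in words:
--         length = len(word)
--         for i in range(length):
--             counter[word[i]] += 10 ** (length - i - 1)
--     # assign digits 9,8,7,... to the letters themselves, heaviest first
--     letters = sorted(counter, key=lambda c: counter[c], reverse=True)
--     digit = {ch: 9 - i for i, ch in enumerate(letters)}
--     # second pass: accumulate each word's positional value from its letters' digits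
--     total = 0
--     for word in words:
--         length = len(word)
--         for i in range(length):
--             total += digit[word[i]] * 10 ** (length - i - 1)
--     return total
-- ===== Notes on version B (the rewrite author's own statement) =====
-- stated objective: alternative
-- what changed: B keeps the weight counter but replaces A's sort-the-values-and-multiply-by-9-i phase with a different decomposition: it sorts the letters by weight, builds a letter-to-digit dict, and re-scans every word accumulating digit*10^position.
import Mathlib
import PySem

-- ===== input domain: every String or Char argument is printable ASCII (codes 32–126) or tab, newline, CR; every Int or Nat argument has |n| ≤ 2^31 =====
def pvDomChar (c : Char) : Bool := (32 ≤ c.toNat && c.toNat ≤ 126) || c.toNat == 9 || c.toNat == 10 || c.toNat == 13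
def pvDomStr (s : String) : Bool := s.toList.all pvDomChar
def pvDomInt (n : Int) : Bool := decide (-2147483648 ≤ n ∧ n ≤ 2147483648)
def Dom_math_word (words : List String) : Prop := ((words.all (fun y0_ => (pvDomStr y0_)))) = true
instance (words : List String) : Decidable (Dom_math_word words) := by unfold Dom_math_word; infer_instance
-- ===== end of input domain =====

-- B re-implements the second phase: instead of sorting the weight VALUES and multiplying by 9-i,
-- it sorts the letters by weight, builds a letter→digit dict, and re-scans the words accumulating
-- digit·10^position (objective: alternative decomposition, same cost).

-- ===== PORT A =====
-- the first loop of both Pythons is textually identical: 'for word in words: for i in range(len(word)): counter[word[i]] += 10**(len(word)-i-1)'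
def pvWordLoop (d : PySem.Dict Char Int) (word : String) : PySem.Dict Char Int :=
  (PySem.List.pyRange 0 (PySem.List.len word.toList) 1).foldl
    (fun d i => d.modify (PySem.List.pyGetD word.toList i ' ') 0
      (· + (10:Int) ^ (PySem.List.len word.toList - i - 1).toNat)) d

def pvCounter (words : List String) : PySem.Dict Char Int :=
  words.foldl pvWordLoop PySem.Dict.empty

def math_word (words : List String) : Int :=
  let values := PySem.List.sorted (pvCounter words).values (fun x => x) true
  (PySem.List.pyRange 0 (PySem.List.len values) 1).foldl
    (fun result i => result + PySem.List.pyGetD values i 0 * (9 - i)) 0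

-- ===== PORT B =====
-- digit[word[i]] in Source B is a plain dict lookup on a key always present (every letter of words is
-- in counter, hence in letters); ported as getD 0, exact on every reachable input.
def math_word_alt (words : List String) : Int :=
  let counter := pvCounter words
  let letters := PySem.List.sorted counter.keys (fun c => counter.getD c 0) true
  let digit := (PySem.List.enumerate letters).foldl
    (fun (d : PySem.Dict Char Int) p => d.insert p.2 (9 - p.1)) PySem.Dict.empty
  words.foldl (fun total word =>
    (PySem.List.pyRange 0 (PySem.List.len word.toList) 1).foldl
      (fun total i => total + digit.getD (PySem.List.pyGetD word.toList i ' ') 0 *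
        (10:Int) ^ (PySem.List.len word.toList - i - 1).toNat) total) 0

-- ===== PRECONDITION & SPEC =====
def Spec_math_word (words : List String) (out : Int) : Prop := out = math_word_alt words
instance (words : List String) (out : Int) : Decidable (Spec_math_word words out) := by unfold Spec_math_word; infer_instance

-- ===== CLAIM (what is proved, stated in full; the proofs are below) =====
def Claim_equal_math_word : Prop := ∀ (words : List String), Dom_math_word words → Spec_math_word words (math_word words)

-- ===== LEMMAS AND PROOFS =====

-- the (letter, positional weight) pairs a single word contributes
def pvPairs (cs : List Char) : List (Char × Int) :=
  (PySem.List.pyRange 0 (PySem.List.len cs) 1).map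
    (fun i => (PySem.List.pyGetD cs i ' ', (10:Int) ^ (PySem.List.len cs - i - 1).toNat))

-- the weighted sum Σ_{k ∈ d} g k · d[k]
def pvW (g : Char → Int) (d : PySem.Dict Char Int) : Int :=
  (d.keys.map (fun k => g k * d.getD k 0)).sum

theorem pvWordLoop_eq (d : PySem.Dict Char Int) (w : String) :
    pvWordLoop d w = (pvPairs w.toList).foldl (fun d p => d.modify p.1 0 (· + p.2)) d := by
  simp [pvWordLoop, pvPairs, List.foldl_map]

theorem pvCounter_eq (words : List String) (d : PySem.Dict Char Int) :
    words.foldl pvWordLoop d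
      = (words.flatMap (fun w => pvPairs w.toList)).foldl
          (fun d p => d.modify p.1 0 (· + p.2)) d := by
  induction words generalizing d with
  | nil => rfl
  | cons w ws ih => simp [List.flatMap_cons, List.foldl_append, ih, pvWordLoop_eq]

theorem pvNodup_modify (d : PySem.Dict Char Int) (hnd : d.keys.Nodup) (c : Char) (f : Int → Int) :
    (d.modify c 0 f).keys.Nodup := by
  rw [PySem.Dict.keys_modify]
  by_cases hc : d.contains c = true
  · rw [PySem.Dict.keys_insert_of_contains _ _ hc]; exact hnd
  · rw [PySem.Dict.keys_insert_of_not_contains _ _ (by simpa using hc)]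
    have hcm : c ∉ d.keys := by
      intro hm
      exact hc ((PySem.Dict.contains_iff_mem_keys _ _).mpr hm)
    simp [List.nodup_append, hnd]
    exact fun a ha h => hcm (h ▸ ha)

theorem pvW_modify (g : Char → Int) (d : PySem.Dict Char Int) (hnd : d.keys.Nodup)
    (c : Char) (w : Int) :
    pvW g (d.modify c 0 (· + w)) = pvW g d + g c * w := by
  unfold pvW
  have hk := PySem.Dict.keys_modify d c 0 (· + w)
  by_cases hc : d.contains c = true
  · rw [hk, PySem.Dict.keys_insert_of_contains _ _ hc]
    have hmem : c ∈ d.keys := (PySem.Dict.contains_iff_mem_keys _ _).mp hc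
    have hperm := List.perm_cons_erase hmem
    rw [List.Perm.sum_eq (hperm.map _), List.Perm.sum_eq (hperm.map (fun k => g k * d.getD k 0))]
    simp only [List.map_cons, List.sum_cons]
    have herase : ∀ k ∈ d.keys.erase c,
        g k * (d.modify c 0 (· + w)).getD k 0 = g k * d.getD k 0 := by
      intro k hkm
      have hne : k ≠ c := ((List.Nodup.mem_erase_iff hnd).mp hkm).1
      rw [PySem.Dict.getD_modify, if_neg hne]
    rw [List.map_congr_left herase, PySem.Dict.getD_modify]
    split_ifs with hcc
    · ring
    · simp at hcc
  · rw [hk, PySem.Dict.keys_insert_of_not_contains _ _ (by simpa using hc)]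
    have hcm : c ∉ d.keys := fun hm => hc ((PySem.Dict.contains_iff_mem_keys _ _).mpr hm)
    rw [List.map_append, List.sum_append]
    have hkeep : ∀ k ∈ d.keys,
        g k * (d.modify c 0 (· + w)).getD k 0 = g k * d.getD k 0 := by
      intro k hkm
      have hne : k ≠ c := fun h => hcm (h ▸ hkm)
      rw [PySem.Dict.getD_modify, if_neg hne]
    rw [List.map_congr_left hkeep]
    simp only [List.map_cons, List.map_nil, List.sum_cons, List.sum_nil]
    rw [PySem.Dict.getD_modify, if_pos rfl,
      PySem.Dict.getD_of_not_contains _ _ (by simpa using hc)]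
    ring

theorem pvW_foldl (g : Char → Int) (Q : List (Char × Int)) (d : PySem.Dict Char Int)
    (hnd : d.keys.Nodup) :
    pvW g (Q.foldl (fun d p => d.modify p.1 0 (· + p.2)) d)
      = pvW g d + (Q.map (fun p => g p.1 * p.2)).sum := by
  induction Q generalizing d with
  | nil => simp
  | cons p Q ih =>
      simp only [List.foldl_cons, List.map_cons, List.sum_cons,
        ih _ (pvNodup_modify d hnd p.1 _), pvW_modify g d hnd p.1 p.2]
      ring

theorem pvTotal_eq (g : Char → Int) (words : List String) (t : Int) :
    words.foldl (fun total word =>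
      (PySem.List.pyRange 0 (PySem.List.len word.toList) 1).foldl
        (fun total i => total + g (PySem.List.pyGetD word.toList i ' ') *
          (10:Int) ^ (PySem.List.len word.toList - i - 1).toNat) total) t
      = t + ((words.flatMap (fun w => pvPairs w.toList)).map (fun p => g p.1 * p.2)).sum := by
  induction words generalizing t with
  | nil => simp
  | cons w ws ih =>
      simp only [List.foldl_cons, List.flatMap_cons, List.map_append, List.sum_append, ih]
      have : (PySem.List.pyRange 0 (PySem.List.len w.toList) 1).foldl
          (fun total i => total + g (PySem.List.pyGetD w.toList i ' ') *
            (10:Int) ^ (PySem.List.len w.toList - i - 1).toNat) t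
          = t + ((pvPairs w.toList).map (fun p => g p.1 * p.2)).sum := by
        simp [pvPairs, List.map_map, ← PySem.List.foldl_add]
      rw [this]; ring

theorem pvC_nodup (words : List String) : (pvCounter words).keys.Nodup := by
  rw [pvCounter, pvCounter_eq]
  exact PySem.Dict.nodup_keys_foldl_modify_key _ (fun (p : Char × Int) => p.1) 0
    (fun (_ : PySem.Dict Char Int) (p : Char × Int) => (· + p.2)) _
    (by simp [PySem.Dict.keys_empty])

theorem pvDigit_getD (letters : List Char) (hnd : letters.Nodup) (j : Nat) (hj : j < letters.length) :
    ((PySem.List.enumerate letters).foldl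
      (fun (d : PySem.Dict Char Int) p => d.insert p.2 (9 - p.1)) PySem.Dict.empty).getD letters[j] 0
      = 9 - (j : Int) := by
  have hfresh : ∀ p ∈ PySem.List.enumerate letters,
      (PySem.Dict.empty : PySem.Dict Char Int).contains p.2 = false := by
    intro p _; simp
  have hkn : ((PySem.List.enumerate letters).map (fun p => p.2)).Nodup := by
    rw [PySem.List.map_snd_enumerate]; exact hnd
  have hitems := PySem.Dict.items_foldl_insert_fresh (PySem.List.enumerate letters)
    (fun p => p.2) (fun p => 9 - p.1) PySem.Dict.empty hfresh hkn
  set D := (PySem.List.enumerate letters).foldl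
    (fun (d : PySem.Dict Char Int) p => d.insert p.2 (9 - p.1)) PySem.Dict.empty with hD
  have hkeys : D.keys.Nodup := by
    have : D.keys = (PySem.List.enumerate letters).map (fun p => p.2) := by
      simp only [PySem.Dict.keys, hitems, List.map_append, List.map_map]
      simp [Function.comp_def]
      rfl
    rw [this]; exact hkn
  have hmem : (letters[j], (9:Int) - (j:Int)) ∈ D.items := by
    rw [hitems]
    refine List.mem_append_right _ ?_
    refine List.mem_map.mpr ⟨((j:Int), letters[j]), ?_, rfl⟩
    exact (PySem.List.mem_enumerate_iff letters 0 _).mpr ⟨j, hj, by simp⟩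
  exact PySem.Dict.getD_of_mem_items D hmem hkeys 0

theorem pvSorted_map (l : List Char) (key : Char → Int) :
    PySem.List.sorted (l.map key) (fun x => x) true
      = (PySem.List.sorted l key true).map key := by
  apply List.eq_of_perm_of_sorted (le := fun a b : Int => b ≤ a)
  · exact fun a b _ _ h1 h2 => le_antisymm h2 h1
  · exact PySem.List.sorted_pairwise_rev (l.map key) (fun x => x)
  · exact List.pairwise_map.mpr (PySem.List.sorted_pairwise_rev l key)
  · exact (PySem.List.sorted_perm (l.map key) _ true).trans
      (((PySem.List.sorted_perm l key true).map key).symm)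

theorem pvValues_eq (C : PySem.Dict Char Int) (hnd : C.keys.Nodup) :
    C.values = C.keys.map (fun k => C.getD k 0) := by
  have h := PySem.Dict.items_eq_map_keys C hnd 0
  simp only [PySem.Dict.values, h, List.map_map]
  rfl

theorem pvRangeSum (V : List Int) :
    (PySem.List.pyRange 0 (PySem.List.len V) 1).foldl
      (fun result i => result + PySem.List.pyGetD V i 0 * (9 - i)) 0
      = ((PySem.List.enumerate V).map (fun p => p.2 * (9 - p.1))).sum := by
  rw [PySem.List.enumerate_eq_map_pyRange V 0, List.map_map,
    PySem.List.foldl_add _ (fun i => PySem.List.pyGetD V i 0 * (9 - i)) 0]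
  simp [Function.comp_def]

theorem pvEnumerate_map (l : List Char) (f : Char → Int) (s : Int) :
    PySem.List.enumerate (l.map f) s = (PySem.List.enumerate l s).map (fun p => (p.1, f p.2)) := by
  induction l generalizing s with
  | nil => simp [PySem.List.enumerate_nil]
  | cons x xs ih => simp [PySem.List.enumerate_cons, ih]

theorem pvB_eq (words : List String) (digit : PySem.Dict Char Int) :
    words.foldl (fun total word =>
      (PySem.List.pyRange 0 (PySem.List.len word.toList) 1).foldl
        (fun total i => total + digit.getD (PySem.List.pyGetD word.toList i ' ') 0 *
          (10:Int) ^ (PySem.List.len word.toList - i - 1).toNat) total) 0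
      = pvW (fun c => digit.getD c 0) (pvCounter words) := by
  have h := pvTotal_eq (fun c => digit.getD c 0) words 0
  rw [h, pvCounter, pvCounter_eq,
    pvW_foldl _ _ _ (by simp [PySem.Dict.keys_empty])]
  simp [pvW, PySem.Dict.keys_empty]

theorem pv_main (words : List String) : math_word words = math_word_alt words := by
  have hndC : (pvCounter words).keys.Nodup := pvC_nodup words
  have hndL : (PySem.List.sorted (pvCounter words).keys
      (fun c => (pvCounter words).getD c 0) true).Nodup :=
    ((PySem.List.sorted_perm _ _ true).nodup_iff).mpr hndC
  have hdig := fun (j : Nat)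
      (hj : j < (PySem.List.sorted (pvCounter words).keys
        (fun c => (pvCounter words).getD c 0) true).length) =>
    pvDigit_getD _ hndL j hj
  simp only [math_word, math_word_alt]
  rw [pvRangeSum, pvValues_eq _ hndC, pvSorted_map, pvEnumerate_map, List.map_map, pvB_eq]
  simp only [pvW]
  generalize hD : (PySem.List.enumerate (PySem.List.sorted (pvCounter words).keys
      (fun c => (pvCounter words).getD c 0) true)).foldl
      (fun (d : PySem.Dict Char Int) p => d.insert p.2 (9 - p.1)) PySem.Dict.empty = D
  rw [hD] at hdig
  rw [← List.Perm.sum_eq ((PySem.List.sorted_perm (pvCounter words).keys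
      (fun c => (pvCounter words).getD c 0) true).map _)]
  conv_rhs => rw [← PySem.List.map_snd_enumerate (PySem.List.sorted (pvCounter words).keys
      (fun c => (pvCounter words).getD c 0) true) 0, List.map_map]
  refine congrArg List.sum (List.map_congr_left ?_)
  intro p hp
  obtain ⟨j, hj, rfl⟩ := (PySem.List.mem_enumerate_iff _ 0 _).mp hp
  simp only [Function.comp_def]
  rw [hdig j hj]
  ring

-- ===== VERDICT (by name: the statement is the Claim_ definition above) =====
theorem math_word_spec : Claim_equal_math_word := by
  intro words _
  unfold Spec_math_word
  exact pv_main words
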